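-- pv_equiv track=rewrite | github.com/zoedolan/Vybn | quantum_delusions/vybn_curvature/post_reducer_qca.py | group_pairs
-- ===== SOURCE A (Python) =====
-- from collections import defaultdict, Counter
--
-- def group_pairs(counts_dict):
--     bases = defaultdict(dict)
--     for name in counts_dict.keys():
--         if name.endswith("_cw"):
--             bases[name[:-3]]['cw'] = name
--         elif name.endswith("_ccw"):
--             bases[name[:-4]]['ccw'] = name
--     return {b:(v.get('cw'),v.get('ccw')) for b,v in bases.items() if 'cw' in v and 'ccw' in v}
-- ===== SOURCE B (Python) =====
-- def group_pairs(counts_dict):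
--     names = list(counts_dict)
--     out = {}
--     for n in names:
--         if n.endswith("_cw"):
--             b = n[:-3]
--         elif n.endswith("_ccw"):
--             b = n[:-4]
--         else:
--             continue
--         cw = ccw = None
--         for m in names:
--             if m.endswith("_cw") and m[:-3] == b:
--                 cw = m
--             elif m.endswith("_ccw") and m[:-4] == b:
--                 ccw = m
--         if cw is not None and ccw is not None:
--             out[b] = (cw, ccw)
--     return out
-- ===== Notes on version B (the rewrite author's own statement) =====
-- stated objective: alternative
-- what changed: A builds a base->{cw,ccw} nested dict in one pass and filters it; B keeps no index at all: at each suffixed name it brute-force rescans the whole key list for the last _cw and last _ccw name with that base and emits the pair at the base's first suffixed occurrence.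
import Mathlib
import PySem

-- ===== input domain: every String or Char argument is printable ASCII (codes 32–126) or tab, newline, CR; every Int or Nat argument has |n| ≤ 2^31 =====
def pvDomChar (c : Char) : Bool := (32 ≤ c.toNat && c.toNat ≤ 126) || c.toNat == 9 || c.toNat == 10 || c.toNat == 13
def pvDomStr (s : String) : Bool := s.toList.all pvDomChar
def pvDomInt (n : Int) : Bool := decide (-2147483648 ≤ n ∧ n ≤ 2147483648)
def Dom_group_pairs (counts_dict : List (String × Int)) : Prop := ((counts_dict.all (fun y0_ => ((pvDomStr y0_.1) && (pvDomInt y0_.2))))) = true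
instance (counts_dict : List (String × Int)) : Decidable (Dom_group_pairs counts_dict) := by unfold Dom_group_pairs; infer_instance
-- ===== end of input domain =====

-- B drops A's base->{cw,ccw} index entirely: at each suffixed name it brute-force rescans the whole
-- key list for the last matching _cw and _ccw names and emits the pair at the base's first suffixed
-- occurrence (objective: alternative; O(n^2) rescans instead of A's single indexed pass).

-- ===== PORT A =====
-- 'bases[name[:-3]]["cw"] = name' on the defaultdict is Dict.modify with default Dict.empty;
-- v.get('cw') / v.get('ccw') are ported as getD "" — the comprehension's filter guarantees both keys are present.
def group_pairs (counts_dict : List (String × Int)) : List (String × String × String) :=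
  let bases : PySem.Dict String (PySem.Dict String String) :=
    counts_dict.foldl (fun bases p =>
      if PySem.Str.endswith p.1 "_cw" then
        bases.modify (PySem.Str.slice p.1 none (some (-3))) PySem.Dict.empty (fun v => v.insert "cw" p.1)
      else if PySem.Str.endswith p.1 "_ccw" then
        bases.modify (PySem.Str.slice p.1 none (some (-4))) PySem.Dict.empty (fun v => v.insert "ccw" p.1)
      else bases) PySem.Dict.empty
  (bases.items.filter (fun bv => bv.2.contains "cw" && bv.2.contains "ccw")).map
    (fun bv => (bv.1, bv.2.getD "cw" "", bv.2.getD "ccw" ""))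

-- ===== PORT B =====
-- the inner 'for m in names' loop of Source B: last _cw / last _ccw name whose base is b
def scanPair (names : List (String × Int)) (b : String) : Option String × Option String :=
  names.foldl (fun cwccw m =>
    if PySem.Str.endswith m.1 "_cw" && (PySem.Str.slice m.1 none (some (-3)) == b) then (some m.1, cwccw.2)
    else if PySem.Str.endswith m.1 "_ccw" && (PySem.Str.slice m.1 none (some (-4)) == b) then (cwccw.1, some m.1)
    else cwccw) (none, none)

-- the scan-then-insert body shared by both branches of Source B's outer loop
def emitPair (names : List (String × Int)) (out : PySem.Dict String (String × String))
    (b : String) : PySem.Dict String (String × String) :=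
  match scanPair names b with
  | (some c, some w) => out.insert b (c, w)
  | _ => out

def group_pairs_alt (counts_dict : List (String × Int)) : List (String × String × String) :=
  let out : PySem.Dict String (String × String) :=
    counts_dict.foldl (fun out n =>
      if PySem.Str.endswith n.1 "_cw" then
        emitPair counts_dict out (PySem.Str.slice n.1 none (some (-3)))
      else if PySem.Str.endswith n.1 "_ccw" then
        emitPair counts_dict out (PySem.Str.slice n.1 none (some (-4)))
      else out) PySem.Dict.empty
  out.items

-- ===== PRECONDITION & SPEC =====
def Spec_group_pairs (counts_dict : List (String × Int)) (out : List (String × String × String)) : Prop := out = group_pairs_alt counts_dict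
instance (counts_dict : List (String × Int)) (out : List (String × String × String)) : Decidable (Spec_group_pairs counts_dict out) := by unfold Spec_group_pairs; infer_instance

-- ===== CLAIM (what is proved, stated in full; the proofs are below) =====
def Claim_equal_group_pairs : Prop := ∀ (counts_dict : List (String × Int)), Dom_group_pairs counts_dict → Spec_group_pairs counts_dict (group_pairs counts_dict)

-- ===== LEMMAS AND PROOFS =====

-- classification of a name: some (isCw, base) for a '_cw'/'_ccw' name, none otherwise
def tagOf (n : String) : Option (Bool × String) :=
  if PySem.Str.endswith n "_cw" then some (true, PySem.Str.slice n none (some (-3)))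
  else if PySem.Str.endswith n "_ccw" then some (false, PySem.Str.slice n none (some (-4)))
  else none

def kname (t : Bool) : String := if t then "cw" else "ccw"

-- the (isCw, base, name) triples of the suffixed names, in order
def tags (counts_dict : List (String × Int)) : List (Bool × String × String) :=
  counts_dict.filterMap (fun p => (tagOf p.1).map (fun tb => (tb.1, tb.2, p.1)))

def bl (counts_dict : List (String × Int)) : List String := (tags counts_dict).map (fun q => q.2.1)

-- the last name of kind t with base b (what both programs' pair components are)
def lastOf (counts_dict : List (String × Int)) (t : Bool) (b : String) : Option String :=
  (((tags counts_dict).filter (fun q => q.1 == t && q.2.1 == b)).map (fun q => q.2.2)).getLast?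

-- the common closed description of both results
def spec (xs : List (String × Int)) : List (String × String × String) :=
  ((PySem.Set.ofList (bl xs)).filter
      (fun b => (lastOf xs true b).isSome && (lastOf xs false b).isSome)).map
    (fun b => (b, (lastOf xs true b).getD "", (lastOf xs false b).getD ""))

-- A's inner dict for base b
def innerD (xs : List (String × Int)) (b : String) : PySem.Dict String String :=
  ((tags xs).filter (fun q => q.2.1 == b)).foldl (fun d q => d.insert (kname q.1) q.2.2) PySem.Dict.empty

def stepA (bases : PySem.Dict String (PySem.Dict String String)) (p : String × Int) :
    PySem.Dict String (PySem.Dict String String) :=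
  match tagOf p.1 with
  | none => bases
  | some (t, b) => bases.insert b ((bases.getD b PySem.Dict.empty).insert (kname t) p.1)

def basesA (xs : List (String × Int)) : PySem.Dict String (PySem.Dict String String) :=
  xs.foldl stepA PySem.Dict.empty

-- B's outer loop step, abstracted over the two lookup functions it emits from
def stepB (c w : String → Option String) (o : PySem.Dict String (String × String))
    (p : String × Int) : PySem.Dict String (String × String) :=
  match tagOf p.1 with
  | none => o
  | some (_, b) =>
      if (c b).isSome && (w b).isSome then o.insert b ((c b).getD "", (w b).getD "") else o

theorem tags_concat_none (xs : List (String × Int)) (p : String × Int) (h : tagOf p.1 = none) :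
    tags (xs ++ [p]) = tags xs := by
  simp [tags, List.filterMap_append, h]

theorem tags_concat_some (xs : List (String × Int)) (p : String × Int) (t : Bool) (b : String)
    (h : tagOf p.1 = some (t, b)) : tags (xs ++ [p]) = tags xs ++ [(t, b, p.1)] := by
  simp [tags, List.filterMap_append, h]

theorem lastOf_concat (xs : List (String × Int)) (p : String × Int) (t : Bool) (b : String)
    (h : tagOf p.1 = some (t, b)) (t' : Bool) (b' : String) :
    lastOf (xs ++ [p]) t' b' = if t = t' ∧ b = b' then some p.1 else lastOf xs t' b' := by
  unfold lastOf
  rw [tags_concat_some xs p t b h, List.filter_append]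
  by_cases hc : t = t' ∧ b = b'
  · obtain ⟨h1, h2⟩ := hc
    subst h1; subst h2
    rw [if_pos ⟨rfl, rfl⟩]
    have hf : (List.filter (fun q => q.1 == t && q.2.1 == b) [(t, b, p.1)]) = [(t, b, p.1)] := by
      simp
    rw [hf, List.map_append]
    simp
  · rw [if_neg hc]
    have hf : (List.filter (fun q => q.1 == t' && q.2.1 == b') [(t, b, p.1)]) = [] := by
      have : ¬ ((t == t' && b == b') = true) := by
        simp only [Bool.and_eq_true, beq_iff_eq]; tauto
      simp [this]
    rw [hf, List.append_nil]

theorem bl_concat_some (xs : List (String × Int)) (p : String × Int) (t : Bool) (b : String)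
    (h : tagOf p.1 = some (t, b)) : bl (xs ++ [p]) = bl xs ++ [b] := by
  simp [bl, tags_concat_some xs p t b h]

theorem innerD_concat (xs : List (String × Int)) (p : String × Int) (t : Bool) (b : String)
    (h : tagOf p.1 = some (t, b)) (b' : String) :
    innerD (xs ++ [p]) b' =
      if b = b' then (innerD xs b').insert (kname t) p.1 else innerD xs b' := by
  unfold innerD
  rw [tags_concat_some xs p t b h, List.filter_append]
  by_cases hb : b = b'
  · subst hb
    rw [if_pos rfl]
    have hf : (List.filter (fun q => q.2.1 == b) [(t, b, p.1)]) = [(t, b, p.1)] := by simp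
    rw [hf, List.foldl_append]
    rfl
  · rw [if_neg hb]
    have hf : (List.filter (fun q => q.2.1 == b') [(t, b, p.1)]) = [] := by
      have : ¬ ((b == b') = true) := by simpa using hb
      simp [this]
    rw [hf, List.append_nil]

theorem innerD_of_not_mem (xs : List (String × Int)) (b : String) (h : b ∉ bl xs) :
    innerD xs b = PySem.Dict.empty := by
  unfold innerD
  have h0 : (tags xs).filter (fun q => q.2.1 == b) = [] := by
    rw [List.filter_eq_nil_iff]
    intro q hq hqb
    apply h
    unfold bl
    exact List.mem_map.mpr ⟨q, hq, by simpa using hqb⟩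
  rw [h0]
  rfl

theorem kname_inj (t t' : Bool) : kname t = kname t' ↔ t = t' := by
  cases t <;> cases t' <;> simp [kname]

theorem innerD_get? (xs : List (String × Int)) (b : String) (t : Bool) :
    (innerD xs b).get? (kname t) = lastOf xs t b := by
  induction xs using List.reverseRecOn with
  | nil => rfl
  | append_singleton xs p ih =>
    cases htag : tagOf p.1 with
    | none =>
      unfold innerD lastOf
      rw [tags_concat_none xs p htag]
      exact ih
    | some tb =>
      obtain ⟨t0, b0⟩ := tb
      rw [innerD_concat xs p t0 b0 htag b, lastOf_concat xs p t0 b0 htag t b]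
      by_cases hb : b0 = b
      · rw [if_pos hb, PySem.Dict.get?_insert]
        by_cases ht : t0 = t
        · rw [if_pos (((kname_inj t t0).mpr ht.symm)), if_pos ⟨ht, hb⟩]
        · rw [if_neg (fun hc => ht ((kname_inj t t0).mp hc).symm),
            if_neg (fun hc => ht hc.1), ih]
      · rw [if_neg hb, if_neg (fun hc => hb hc.2), ih]

-- small facts about PySem.Set.add / ofList used below
theorem add_of_mem {s : PySem.Set String} {x : String} (h : x ∈ s) :
    PySem.Set.add s x = s := by
  unfold PySem.Set.add
  rw [if_pos (show PySem.Set.contains s x = true from List.contains_iff_mem.mpr h)]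

theorem add_of_not_mem {s : PySem.Set String} {x : String} (h : x ∉ s) :
    PySem.Set.add s x = s ++ [x] := by
  unfold PySem.Set.add
  rw [if_neg (show ¬ PySem.Set.contains s x = true from fun hc => h (List.contains_iff_mem.mp hc))]

theorem ofList_concat (l : List String) (x : String) :
    PySem.Set.ofList (l ++ [x]) = PySem.Set.add (PySem.Set.ofList l) x := by
  rw [PySem.Set.ofList_eq_foldl, PySem.Set.ofList_eq_foldl,
    List.foldl_append, List.foldl_cons, List.foldl_nil]

-- A's bases dict, fully characterised
theorem basesA_items (xs : List (String × Int)) :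
    (basesA xs).items = (PySem.Set.ofList (bl xs)).map (fun b => (b, innerD xs b)) := by
  induction xs using List.reverseRecOn with
  | nil => rfl
  | append_singleton xs p ih =>
    have hstep : basesA (xs ++ [p]) = stepA (basesA xs) p := by
      unfold basesA; rw [List.foldl_append]; rfl
    have hkeys : (basesA xs).keys = PySem.Set.ofList (bl xs) := by
      unfold PySem.Dict.keys
      rw [ih, List.map_map]
      rw [show ((fun (x : String × PySem.Dict String String) => x.1) ∘
          fun b => (b, innerD xs b)) = id from rfl, List.map_id]
    cases htag : tagOf p.1 with
    | none =>
      rw [hstep]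
      unfold stepA
      rw [htag]
      have hbl : bl (xs ++ [p]) = bl xs := by simp [bl, tags_concat_none xs p htag]
      rw [hbl, ih]
      apply List.map_congr_left
      intro b _
      unfold innerD
      rw [tags_concat_none xs p htag]
    | some tb =>
      obtain ⟨t, b⟩ := tb
      rw [hstep]
      unfold stepA
      rw [htag]
      have hbl := bl_concat_some xs p t b htag
      have hnodup : (PySem.Set.ofList (bl xs)).Nodup := PySem.Set.nodup_ofList _
      by_cases hmem : b ∈ bl xs
      · -- base already present: in-place replacement of its inner dict
        have hmemo : b ∈ PySem.Set.ofList (bl xs) := (PySem.Set.mem_ofList _ _).mpr hmem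
        have hcont : (basesA xs).contains b = true := by
          rw [PySem.Dict.contains_eq_decide_mem_keys, hkeys]; simpa using hmemo
        have hget : (basesA xs).getD b PySem.Dict.empty = innerD xs b := by
          rw [PySem.Dict.getD_eq_get?_getD,
            PySem.Dict.get?_of_mem_items (basesA xs)
              (by rw [ih]; exact List.mem_map_of_mem hmemo)
              (by rw [hkeys]; exact hnodup)]
          rfl
        rw [PySem.Dict.items_insert_of_contains _ _ hcont, ih, List.map_map, hbl]
        have hofl : PySem.Set.ofList (bl xs ++ [b]) = PySem.Set.ofList (bl xs) := by
          rw [ofList_concat, add_of_mem hmemo]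
        rw [hofl]
        apply List.map_congr_left
        intro b' hb'
        rw [Function.comp_apply, innerD_concat xs p t b htag b']
        by_cases hbb : b' = b
        · subst hbb
          rw [if_pos rfl]
          have : (b' == b') = true := by simp
          rw [if_pos this, hget]
        · have h1 : ¬ (b' == b) = true := by simpa using hbb
          have h2 : ¬ (b = b') := fun hc => hbb hc.symm
          rw [if_neg h1, if_neg h2]
      · -- new base: appended at the end
        have hmemo : b ∉ PySem.Set.ofList (bl xs) := fun hc => hmem ((PySem.Set.mem_ofList _ _).mp hc)
        have hcont : (basesA xs).contains b = false := by
          rw [PySem.Dict.contains_eq_decide_mem_keys, hkeys]; simpa using hmemo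
        have hget : (basesA xs).getD b PySem.Dict.empty = PySem.Dict.empty :=
          PySem.Dict.getD_of_not_contains _ _ hcont
        rw [PySem.Dict.items_insert_of_not_contains _ _ hcont, ih, hbl]
        have hofl : PySem.Set.ofList (bl xs ++ [b]) = PySem.Set.ofList (bl xs) ++ [b] := by
          rw [ofList_concat, add_of_not_mem hmemo]
        rw [hofl, List.map_append]
        congr 1
        · apply List.map_congr_left
          intro b' hb'
          rw [innerD_concat xs p t b htag b']
          have : ¬ (b = b') := fun hc => hmemo (hc ▸ hb')
          rw [if_neg this]
        · simp only [List.map_cons, List.map_nil]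
          rw [innerD_concat xs p t b htag b, if_pos rfl, innerD_of_not_mem xs b hmem, hget]

-- B's brute-force scan, characterised: it computes exactly the two last matching names
theorem not_both_suffixes (n : String) :
    ¬(PySem.Str.endswith n "_cw" = true ∧ PySem.Str.endswith n "_ccw" = true) := by
  rintro ⟨h1, h2⟩
  rw [show PySem.Str.endswith n "_cw" = PySem.Chars.endswith n.toList "_cw".toList from rfl,
    PySem.Chars.endswith_iff] at h1
  rw [show PySem.Str.endswith n "_ccw" = PySem.Chars.endswith n.toList "_ccw".toList from rfl,
    PySem.Chars.endswith_iff] at h2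
  rcases List.suffix_or_suffix_of_suffix h1 h2 with h | h
  · exact absurd h (by decide)
  · exact absurd h (by decide)

def stepScan (b : String) (cwccw : Option String × Option String) (m : String × Int) :
    Option String × Option String :=
  match tagOf m.1 with
  | none => cwccw
  | some (t, b0) =>
      if b0 = b then (if t then (some m.1, cwccw.2) else (cwccw.1, some m.1)) else cwccw

theorem stepScan_eq (b : String) :
    (fun (cwccw : Option String × Option String) (m : String × Int) =>
      if PySem.Str.endswith m.1 "_cw" && (PySem.Str.slice m.1 none (some (-3)) == b) then (some m.1, cwccw.2)
      else if PySem.Str.endswith m.1 "_ccw" && (PySem.Str.slice m.1 none (some (-4)) == b) then (cwccw.1, some m.1)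
      else cwccw) = stepScan b := by
  funext cc m
  unfold stepScan tagOf
  by_cases h1 : PySem.Str.endswith m.1 "_cw" = true
  · have h2 : PySem.Str.endswith m.1 "_ccw" = false := by
      rcases Bool.eq_false_or_eq_true (PySem.Str.endswith m.1 "_ccw") with h | h
      · exact absurd ⟨h1, h⟩ (not_both_suffixes m.1)
      · exact h
    by_cases hb : PySem.Str.slice m.1 none (some (-3)) = b
    · simp only [h1, h2]; simp [hb]
    · simp only [h1, h2]; simp [hb]
  · simp only [Bool.not_eq_true] at h1
    by_cases h2 : PySem.Str.endswith m.1 "_ccw" = true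
    · by_cases hb : PySem.Str.slice m.1 none (some (-4)) = b
      · simp only [h1, h2]; simp [hb]
      · simp only [h1, h2]; simp [hb]
    · simp only [Bool.not_eq_true] at h2
      simp only [h1, h2]; simp

theorem scanPair_eq (xs : List (String × Int)) (b : String) :
    scanPair xs b = (lastOf xs true b, lastOf xs false b) := by
  have key : ∀ ys : List (String × Int),
      ys.foldl (stepScan b) (none, none) = (lastOf ys true b, lastOf ys false b) := by
    intro ys
    induction ys using List.reverseRecOn with
    | nil => rfl
    | append_singleton xs p ih =>
      rw [List.foldl_append, List.foldl_cons, List.foldl_nil, ih]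
      cases htag : tagOf p.1 with
      | none =>
        unfold stepScan
        rw [htag]
        have hl : ∀ t', lastOf (xs ++ [p]) t' b = lastOf xs t' b := by
          intro t'; unfold lastOf; rw [tags_concat_none xs p htag]
        rw [hl true, hl false]
      | some tb =>
        obtain ⟨t, b0⟩ := tb
        unfold stepScan
        rw [htag, lastOf_concat xs p t b0 htag true b, lastOf_concat xs p t b0 htag false b]
        by_cases hb : b0 = b
        · cases t <;> simp [hb]
        · simp [hb]
  unfold scanPair
  rw [stepScan_eq b]
  exact key xs

-- the key set a fold of Set.add starts from is a prefix of its result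
theorem prefix_foldl_add (l : List String) : ∀ s : List String,
    s <+: l.foldl PySem.Set.add s := by
  induction l with
  | nil => intro s; exact List.prefix_refl s
  | cons x l ih =>
    intro s
    refine List.IsPrefix.trans ?_ (ih (PySem.Set.add s x))
    unfold PySem.Set.add
    split
    · exact List.prefix_refl s
    · exact ⟨[x], rfl⟩

-- filtering commutes with ordered dedup
theorem filter_foldl_add (p : String → Bool) (l : List String) : ∀ s : List String,
    (l.foldl PySem.Set.add s).filter p = (l.filter p).foldl PySem.Set.add (s.filter p) := by
  induction l with
  | nil => intro s; rfl
  | cons x l ih =>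
    intro s
    simp only [List.foldl_cons]
    rw [ih (PySem.Set.add s x)]
    have hadd : (PySem.Set.add s x).filter p =
        if p x = true then PySem.Set.add (s.filter p) x else s.filter p := by
      by_cases hx : x ∈ s
      · rw [add_of_mem hx]
        by_cases hp : p x = true
        · rw [if_pos hp, add_of_mem (List.mem_filter.mpr ⟨hx, hp⟩)]
        · rw [if_neg hp]
      · rw [add_of_not_mem hx, List.filter_append]
        by_cases hp : p x = true
        · rw [if_pos hp, add_of_not_mem (fun hc => hx (List.mem_filter.mp hc).1)]
          simp [hp]
        · rw [if_neg hp]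
          simp [hp]
    rw [hadd, List.filter_cons]
    by_cases hp : p x = true
    · rw [if_pos hp, if_pos hp, List.foldl_cons]
    · rw [if_neg hp, if_neg hp]

-- the emission loop of B, for fixed lookup functions c and w
theorem loopB_items (c w : String → Option String) (xs : List (String × Int)) :
    ∀ o : PySem.Dict String (String × String),
      (∀ k v, (k, v) ∈ o.items → v = ((c k).getD "", (w k).getD "")) →
      (xs.foldl (stepB c w) o).items =
        o.items ++
          ((((bl xs).filter (fun b => (c b).isSome && (w b).isSome)).foldl
              PySem.Set.add o.keys).drop o.keys.length).map
            (fun b => (b, ((c b).getD "", (w b).getD ""))) := by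
  induction xs with
  | nil =>
    intro o _
    have hbl : bl ([] : List (String × Int)) = [] := rfl
    rw [hbl]
    simp
  | cons p xs ih =>
    intro o hinv
    simp only [List.foldl_cons]
    cases htag : tagOf p.1 with
    | none =>
      have hblc : bl (p :: xs) = bl xs := by simp [bl, tags, htag]
      have hs : stepB c w o p = o := by unfold stepB; rw [htag]
      rw [hs, hblc]
      exact ih o hinv
    | some tb =>
      obtain ⟨t, b⟩ := tb
      have hblc : bl (p :: xs) = b :: bl xs := by simp [bl, tags, htag]
      have hs : stepB c w o p =
          (if (c b).isSome && (w b).isSome then o.insert b ((c b).getD "", (w b).getD "") else o) := by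
        unfold stepB; rw [htag]
      rw [hs, hblc]
      simp only [List.filter_cons]
      by_cases hq : ((c b).isSome && (w b).isSome) = true
      · rw [if_pos hq, if_pos hq, List.foldl_cons]
        by_cases hcont : o.contains b = true
        · -- re-insertion of an existing key with the value it already carries: nothing changes
          have hitems : (o.insert b ((c b).getD "", (w b).getD "")).items = o.items := by
            rw [PySem.Dict.items_insert_of_contains _ _ hcont]
            conv_rhs => rw [← List.map_id o.items]
            apply List.map_congr_left
            intro q hq'
            by_cases hqb : (q.1 == b) = true
            · have h1 : q.1 = b := by simpa using hqb
              have h2 : q.2 = ((c q.1).getD "", (w q.1).getD "") := hinv q.1 q.2 hq'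
              rw [if_pos hqb, id_eq, ← h1, ← h2]
            · rw [if_neg hqb, id_eq]
          have hkeys : (o.insert b ((c b).getD "", (w b).getD "")).keys = o.keys :=
            PySem.Dict.keys_insert_of_contains _ _ hcont
          have hinv' : ∀ k v, (k, v) ∈ (o.insert b ((c b).getD "", (w b).getD "")).items →
              v = ((c k).getD "", (w k).getD "") := by
            rw [hitems]; exact hinv
          have hmemk : b ∈ o.keys := by
            rw [PySem.Dict.contains_eq_decide_mem_keys] at hcont
            exact of_decide_eq_true hcont
          have hadd : PySem.Set.add o.keys b = o.keys := add_of_mem hmemk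
          rw [ih _ hinv', hitems, hkeys, hadd]
        · -- a new qualifying base: its pair is appended
          have hcf : o.contains b = false := by simpa using hcont
          have hitems : (o.insert b ((c b).getD "", (w b).getD "")).items =
              o.items ++ [(b, ((c b).getD "", (w b).getD ""))] :=
            PySem.Dict.items_insert_of_not_contains _ _ hcf
          have hkeys : (o.insert b ((c b).getD "", (w b).getD "")).keys = o.keys ++ [b] :=
            PySem.Dict.keys_insert_of_not_contains _ _ hcf
          have hinv' : ∀ k v, (k, v) ∈ (o.insert b ((c b).getD "", (w b).getD "")).items →
              v = ((c k).getD "", (w k).getD "") := by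
            rw [hitems]
            intro k v hkv
            rcases List.mem_append.mp hkv with h | h
            · exact hinv k v h
            · simp only [List.mem_singleton, Prod.mk.injEq] at h
              rw [h.2, h.1]
          have hnmemk : b ∉ o.keys := by
            rw [PySem.Dict.contains_eq_decide_mem_keys] at hcf
            simpa using hcf
          have hadd : PySem.Set.add o.keys b = o.keys ++ [b] := add_of_not_mem hnmemk
          rw [ih _ hinv', hitems, hkeys, hadd]
          obtain ⟨rest, hrest⟩ :=
            prefix_foldl_add ((bl xs).filter (fun b => (c b).isSome && (w b).isSome)) (o.keys ++ [b])
          rw [← hrest]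
          have hd1 : (o.keys ++ [b] ++ rest).drop (o.keys ++ [b]).length = rest := List.drop_left
          have hd2 : (o.keys ++ [b] ++ rest).drop o.keys.length = [b] ++ rest := by
            rw [List.append_assoc, List.drop_left]
          rw [hd1, hd2]
          simp
      · rw [if_neg hq, if_neg hq]
        exact ih o hinv

-- the lambdas of the ports, re-expressed through tagOf
theorem stepA_eq :
    (fun (bases : PySem.Dict String (PySem.Dict String String)) (p : String × Int) =>
      if PySem.Str.endswith p.1 "_cw" then
        bases.modify (PySem.Str.slice p.1 none (some (-3))) PySem.Dict.empty (fun v => v.insert "cw" p.1)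
      else if PySem.Str.endswith p.1 "_ccw" then
        bases.modify (PySem.Str.slice p.1 none (some (-4))) PySem.Dict.empty (fun v => v.insert "ccw" p.1)
      else bases) = stepA := by
  funext bases p
  unfold stepA tagOf
  by_cases h1 : PySem.Str.endswith p.1 "_cw" = true
  · simp only [h1]; rfl
  · simp only [Bool.not_eq_true] at h1
    by_cases h2 : PySem.Str.endswith p.1 "_ccw" = true
    · simp only [h1, h2]; rfl
    · simp only [Bool.not_eq_true] at h2
      simp only [h1, h2]; rfl

theorem stepBemit_eq (xs : List (String × Int)) :
    (fun (o : PySem.Dict String (String × String)) (n : String × Int) =>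
      if PySem.Str.endswith n.1 "_cw" then
        emitPair xs o (PySem.Str.slice n.1 none (some (-3)))
      else if PySem.Str.endswith n.1 "_ccw" then
        emitPair xs o (PySem.Str.slice n.1 none (some (-4)))
      else o) = stepB (fun b => lastOf xs true b) (fun b => lastOf xs false b) := by
  funext o p
  have hemit : ∀ b, emitPair xs o b =
      (if (lastOf xs true b).isSome && (lastOf xs false b).isSome then
        o.insert b ((lastOf xs true b).getD "", (lastOf xs false b).getD "") else o) := by
    intro b
    unfold emitPair
    rw [scanPair_eq]
    cases lastOf xs true b <;> cases lastOf xs false b <;> simp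
  unfold stepB tagOf
  by_cases h1 : PySem.Str.endswith p.1 "_cw" = true
  · simp only [h1, if_true]
    rw [hemit]
  · simp only [Bool.not_eq_true] at h1
    by_cases h2 : PySem.Str.endswith p.1 "_ccw" = true
    · simp only [h1, h2, Bool.false_eq_true, if_false, if_true]
      rw [hemit]
    · simp only [Bool.not_eq_true] at h2
      simp only [h1, h2]; rfl

theorem A_eq_spec (xs : List (String × Int)) : group_pairs xs = spec xs := by
  have hcw : ∀ b, (innerD xs b).get? "cw" = lastOf xs true b := fun b => by
    simpa [kname] using innerD_get? xs b true
  have hccw : ∀ b, (innerD xs b).get? "ccw" = lastOf xs false b := fun b => by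
    simpa [kname] using innerD_get? xs b false
  show (((xs.foldl (fun bases p =>
      if PySem.Str.endswith p.1 "_cw" then
        bases.modify (PySem.Str.slice p.1 none (some (-3))) PySem.Dict.empty (fun v => v.insert "cw" p.1)
      else if PySem.Str.endswith p.1 "_ccw" then
        bases.modify (PySem.Str.slice p.1 none (some (-4))) PySem.Dict.empty (fun v => v.insert "ccw" p.1)
      else bases) PySem.Dict.empty).items.filter
        (fun bv => bv.2.contains "cw" && bv.2.contains "ccw")).map
      (fun bv => (bv.1, bv.2.getD "cw" "", bv.2.getD "ccw" ""))) = spec xs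
  rw [stepA_eq]
  have hb : xs.foldl stepA PySem.Dict.empty = basesA xs := rfl
  rw [hb, basesA_items, List.filter_map, List.map_map]
  unfold spec
  rw [List.filter_congr (fun b _ => by
    simp only [Function.comp_apply]
    rw [PySem.Dict.contains_eq_isSome_get?, PySem.Dict.contains_eq_isSome_get?, hcw, hccw])]
  apply List.map_congr_left
  intro b _
  simp only [Function.comp_apply]
  rw [PySem.Dict.getD_eq_get?_getD, PySem.Dict.getD_eq_get?_getD, hcw, hccw]

theorem B_eq_spec (xs : List (String × Int)) : group_pairs_alt xs = spec xs := by
  simp only [group_pairs_alt]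
  rw [stepBemit_eq xs]
  rw [loopB_items (fun b => lastOf xs true b) (fun b => lastOf xs false b) xs PySem.Dict.empty (by
    intro k v hkv
    simp [PySem.Dict.empty] at hkv)]
  have hitems : (PySem.Dict.empty : PySem.Dict String (String × String)).items = [] := rfl
  have hkeys : (PySem.Dict.empty : PySem.Dict String (String × String)).keys = [] := rfl
  rw [hitems, hkeys, List.nil_append]
  simp only [List.length_nil, List.drop_zero]
  have hff := filter_foldl_add
    (fun b => (lastOf xs true b).isSome && (lastOf xs false b).isSome) (bl xs) []
  simp only [List.filter_nil] at hff
  have hofl : ((bl xs).filter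
      (fun b => (lastOf xs true b).isSome && (lastOf xs false b).isSome)).foldl
        PySem.Set.add [] =
      (PySem.Set.ofList (bl xs)).filter
        (fun b => (lastOf xs true b).isSome && (lastOf xs false b).isSome) := by
    rw [PySem.Set.ofList_eq_foldl, hff]
  rw [hofl]
  unfold spec
  rfl

-- ===== VERDICT (by name: the statement is the Claim_ definition above) =====
theorem group_pairs_spec : Claim_equal_group_pairs := by
  intro xs _
  unfold Spec_group_pairs
  rw [A_eq_spec, B_eq_spec]
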